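-- pv_equiv track=rewrite | github.com/ImryUzan/Ex3ComputationalBiology | bio3.py | create_zero_som
-- ===== SOURCE A (Python) =====
-- def create_zero_som(first_line_size = 5,mid_line_size = 9,vec_size = 15,min_possible_val = 0, max_possible_val = 300000):
--
--     zero_som = []
--
--
--     #create the upper lines
--     for line_size in range(first_line_size,mid_line_size):
--         new_line = []
--         for i in range(0,line_size):
--             new_line.append(0)
--
--         zero_som.append(new_line)
--
--     #create the mid line
--     new_line = []
--     for i in range(0, mid_line_size):
--         new_line.append(0)
--
--     zero_som.append(new_line)
--
--
--     #create the lower lines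
--     for line_size_opo in range(first_line_size,mid_line_size):
--         line_size = mid_line_size + first_line_size - 1 - line_size_opo
--         new_line = []
--         for i in range(0,line_size):
--             new_line.append(0)
--
--         zero_som.append(new_line)
--
--
--     return zero_som
-- ===== SOURCE B (Python) =====
-- def create_zero_som(first_line_size=5, mid_line_size=9, vec_size=15, min_possible_val=0, max_possible_val=300000):
--     e = max(0, mid_line_size - first_line_size)
--     return [[0] * (mid_line_size - abs(e - r)) for r in range(2 * e + 1)]
-- ===== Notes on version B (the rewrite author's own statement) =====
-- stated objective: simpler
-- what changed: Replaces A's three explicit loops (ascending rows, middle row, descending rows, each building its row by appending zeros one by one) with a single comprehension over a closed-form row-size formula size(r) = mid_line_size - |e - r| with e = max(0, mid_line_size - first_line_size).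
import Mathlib
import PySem

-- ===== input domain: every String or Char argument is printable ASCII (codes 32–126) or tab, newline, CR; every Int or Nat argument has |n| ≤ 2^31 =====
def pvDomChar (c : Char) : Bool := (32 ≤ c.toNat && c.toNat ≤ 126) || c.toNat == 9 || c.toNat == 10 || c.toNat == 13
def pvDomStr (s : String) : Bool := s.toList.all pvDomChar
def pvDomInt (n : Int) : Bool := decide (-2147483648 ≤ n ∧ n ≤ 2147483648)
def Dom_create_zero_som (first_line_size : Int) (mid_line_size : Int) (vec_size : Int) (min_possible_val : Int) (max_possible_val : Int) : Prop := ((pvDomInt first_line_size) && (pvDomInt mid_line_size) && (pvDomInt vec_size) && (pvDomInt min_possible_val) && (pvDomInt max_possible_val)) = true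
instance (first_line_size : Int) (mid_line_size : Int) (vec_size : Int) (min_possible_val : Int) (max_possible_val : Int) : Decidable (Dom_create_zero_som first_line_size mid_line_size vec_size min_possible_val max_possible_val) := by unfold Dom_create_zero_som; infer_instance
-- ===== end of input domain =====

-- B builds the same grid by one comprehension over a closed-form row-size formula instead of A's three loops (objective: simpler).

-- ===== PORT A =====
def create_zero_som (first_line_size : Int) (mid_line_size : Int) (vec_size : Int) (min_possible_val : Int) (max_possible_val : Int) : List (List Int) :=
  let zero_som : List (List Int) := []
  -- create the upper lines
  let zero_som := (PySem.List.pyRange first_line_size mid_line_size 1).foldl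
    (fun acc line_size =>
      let new_line := (PySem.List.pyRange 0 line_size 1).foldl (fun nl _ => nl ++ [(0 : Int)]) []
      acc ++ [new_line]) zero_som
  -- create the mid line
  let new_line := (PySem.List.pyRange 0 mid_line_size 1).foldl (fun nl _ => nl ++ [(0 : Int)]) []
  let zero_som := zero_som ++ [new_line]
  -- create the lower lines
  let zero_som := (PySem.List.pyRange first_line_size mid_line_size 1).foldl
    (fun acc line_size_opo =>
      let line_size := mid_line_size + first_line_size - 1 - line_size_opo
      let new_line := (PySem.List.pyRange 0 line_size 1).foldl (fun nl _ => nl ++ [(0 : Int)]) []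
      acc ++ [new_line]) zero_som
  zero_som

-- ===== PORT B =====
-- [0]*k is List.replicate k.toNat 0 (Python's negative repeat gives [], toNat clamps the same way)
def create_zero_som_alt (first_line_size : Int) (mid_line_size : Int) (vec_size : Int) (min_possible_val : Int) (max_possible_val : Int) : List (List Int) :=
  let e := max 0 (mid_line_size - first_line_size)
  (PySem.List.pyRange 0 (2 * e + 1) 1).map (fun r => List.replicate (mid_line_size - |e - r|).toNat (0 : Int))

-- ===== PRECONDITION & SPEC =====
def Spec_create_zero_som (first_line_size : Int) (mid_line_size : Int) (vec_size : Int) (min_possible_val : Int) (max_possible_val : Int) (out : List (List Int)) : Prop := out = create_zero_som_alt first_line_size mid_line_size vec_size min_possible_val max_possible_val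
instance (first_line_size : Int) (mid_line_size : Int) (vec_size : Int) (min_possible_val : Int) (max_possible_val : Int) (out : List (List Int)) : Decidable (Spec_create_zero_som first_line_size mid_line_size vec_size min_possible_val max_possible_val out) := by unfold Spec_create_zero_som; infer_instance

-- ===== CLAIM (what is proved, stated in full; the proofs are below) =====
def Claim_equal_create_zero_som : Prop := ∀ (first_line_size : Int) (mid_line_size : Int) (vec_size : Int) (min_possible_val : Int) (max_possible_val : Int), Dom_create_zero_som first_line_size mid_line_size vec_size min_possible_val max_possible_val → Spec_create_zero_som first_line_size mid_line_size vec_size min_possible_val max_possible_val (create_zero_som first_line_size mid_line_size vec_size min_possible_val max_possible_val)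

-- ===== LEMMAS AND PROOFS =====

-- an append-singleton fold is init ++ map
theorem pv_foldl_map {α β : Type} (g : α → β) :
    ∀ (l : List α) (init : List β),
      l.foldl (fun acc y => acc ++ [g y]) init = init ++ l.map g := by
  intro l
  induction l with
  | nil => simp
  | cons a t ih =>
      intro init
      simp [List.foldl_cons, ih]

-- the inner zero-filling loop of A, after pv_foldl_map turns it into a constant map
theorem pv_map_const_zero (n : Int) :
    (PySem.List.pyRange 0 n 1).map (fun _ => (0 : Int)) = List.replicate n.toNat 0 := by
  simp [List.map_const', PySem.List.length_pyRange_one]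

theorem create_zero_som_eq (f m v mn mx : Int) :
    create_zero_som f m v mn mx = create_zero_som_alt f m v mn mx := by
  unfold create_zero_som create_zero_som_alt
  simp only [pv_foldl_map, pv_map_const_zero, List.nil_append]
  by_cases h : m ≤ f
  · -- no upper/lower lines; e = 0, one middle row
    rw [PySem.List.pyRange_one_eq_nil h, max_eq_left (by omega : m - f ≤ 0)]
    have h1 : (2 : Int) * 0 + 1 = 0 + 1 := by ring
    rw [h1, PySem.List.pyRange_one_singleton]
    simp
  · -- f < m; split B's range [0, 2e+1) into [0,e), [e] and [e+1, 2e+1), with e = m - f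
    push_neg at h
    rw [max_eq_right (by omega : (0 : Int) ≤ m - f)]
    rw [PySem.List.pyRange_one_append 0 (m - f) (2 * (m - f) + 1) (by omega) (by omega),
        PySem.List.pyRange_one_cons (by omega : m - f < 2 * (m - f) + 1)]
    simp only [List.map_append, List.map_cons]
    have hmid : m - |m - f - (m - f)| = m := by simp
    rw [hmid, List.append_assoc]
    congr 1
    · -- upper lines
      rw [PySem.List.pyRange_one f m, PySem.List.pyRange_one 0 (m - f)]
      simp only [List.map_map]
      have hlen : (m - f - 0).toNat = (m - f).toNat := by omega
      rw [hlen]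
      apply List.map_congr_left
      intro k hk
      have hk' : (k : Int) < m - f := by
        have := List.mem_range.mp hk
        omega
      simp only [Function.comp]
      have habs : |m - f - (0 + (k : Int))| = m - f - (0 + (k : Int)) :=
        abs_of_nonneg (by omega)
      rw [habs]
      congr 1
      omega
    · -- middle row and lower lines
      simp only [List.singleton_append]
      congr 1
      rw [PySem.List.pyRange_one f m, PySem.List.pyRange_one (m - f + 1) (2 * (m - f) + 1)]
      simp only [List.map_map]
      have hlen : (2 * (m - f) + 1 - (m - f + 1)).toNat = (m - f).toNat := by omega
      rw [hlen]
      apply List.map_congr_left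
      intro k hk
      have hk' : (k : Int) < m - f := by
        have := List.mem_range.mp hk
        omega
      simp only [Function.comp]
      have habs : |m - f - (m - f + 1 + (k : Int))| = -(m - f - (m - f + 1 + (k : Int))) :=
        abs_of_nonpos (by omega)
      rw [habs]
      congr 1
      omega

-- ===== VERDICT (by name: the statement is the Claim_ definition above) =====
theorem create_zero_som_spec : Claim_equal_create_zero_som := by
  intro f m v mn mx _
  unfold Spec_create_zero_som
  exact create_zero_som_eq f m v mn mx
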